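-- pv_equiv track=rewrite | github.com/andreiclu/Python_basics | medium_hard_problems/odd_one_out.py | odd_one_out
-- ===== SOURCE A (Python) =====
-- def odd_one_out(lst):
--         res = []
--         for i in lst:
--             res.append(len(i))
--         k = set(res)
--         cnt = 0
--         if len(k) > 2:
--             return False
--         else:
--             for i in k:
--                 if res.count(i) > 1:
--                     cnt += 1
--             return cnt == 1
-- ===== SOURCE B (Python) =====
-- def odd_one_out(lst):
--     ls = sorted(len(i) for i in lst)
--     runs = 0
--     dups = 0
--     prev = None
--     prev2 = None
--     for v in ls:
--         if v != prev:
--             runs += 1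
--         elif v != prev2:
--             dups += 1
--         prev2 = prev
--         prev = v
--     return runs <= 2 and dups == 1
-- ===== Notes on version B (the rewrite author's own statement) =====
-- stated objective: alternative
-- what changed: B sorts the lengths once and does a single run-scan of the sorted list (counting runs and runs of length >= 2 with prev/prev2 trackers), instead of A's build-length-list / form-set / res.count-per-distinct-length staged passes.
import Mathlib
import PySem

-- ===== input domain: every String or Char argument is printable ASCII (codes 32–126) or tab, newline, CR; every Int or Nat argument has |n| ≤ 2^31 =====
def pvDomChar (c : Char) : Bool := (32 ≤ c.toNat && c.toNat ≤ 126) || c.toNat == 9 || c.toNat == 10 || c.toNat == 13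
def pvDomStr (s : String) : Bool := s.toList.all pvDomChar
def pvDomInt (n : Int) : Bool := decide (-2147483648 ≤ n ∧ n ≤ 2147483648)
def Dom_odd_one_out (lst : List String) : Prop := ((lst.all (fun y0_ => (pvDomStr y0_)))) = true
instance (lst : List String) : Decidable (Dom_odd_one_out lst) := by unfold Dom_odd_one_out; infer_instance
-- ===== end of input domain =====

-- B sorts the lengths and counts runs (and runs of length ≥ 2) in one scan of the sorted
-- list, instead of A's build-length-list / set / res.count-per-distinct-length passes
-- (objective: alternative algorithm, similar cost).

-- ===== PORT A =====
def odd_one_out (lst : List String) : Bool :=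
  let res : List Int := lst.foldl (fun r i => r ++ [PySem.Str.len i]) []
  let k : PySem.Set Int := PySem.Set.ofList res
  if PySem.Set.len k > 2 then
    false
  else
    let cnt : Int := k.foldl (fun c i => if PySem.List.count res i > 1 then c + 1 else c) 0
    cnt == 1

-- ===== PORT B =====
-- state: (runs, dups, prev2, prev)
def odd_one_out_alt (lst : List String) : Bool :=
  let ls : List Int := PySem.List.sorted (lst.map (fun i => PySem.Str.len i)) (fun x => x) false
  let st := ls.foldl
    (fun (st : Int × Int × Option Int × Option Int) v =>
      if some v ≠ st.2.2.2 then (st.1 + 1, st.2.1, st.2.2.2, some v)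
      else if some v ≠ st.2.2.1 then (st.1, st.2.1 + 1, st.2.2.2, some v)
      else (st.1, st.2.1, st.2.2.2, some v))
    ((0 : Int), (0 : Int), (none : Option Int), (none : Option Int))
  decide (st.1 ≤ 2) && (st.2.1 == 1)

-- ===== PRECONDITION & SPEC =====
def Spec_odd_one_out (lst : List String) (out : Bool) : Prop := out = odd_one_out_alt lst
instance (lst : List String) (out : Bool) : Decidable (Spec_odd_one_out lst out) := by unfold Spec_odd_one_out; infer_instance

-- ===== CLAIM (what is proved, stated in full; the proofs are below) =====
def Claim_equal_odd_one_out : Prop := ∀ (lst : List String), Dom_odd_one_out lst → Spec_odd_one_out lst (odd_one_out lst)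

-- ===== LEMMAS AND PROOFS =====

-- A's length-collecting loop builds the list of lengths
lemma pvA_res (lst : List String) (a : List Int) :
    lst.foldl (fun r i => r ++ [PySem.Str.len i]) a = a ++ lst.map PySem.Str.len := by
  induction lst generalizing a with
  | nil => simp
  | cons x xs ih => rw [List.foldl_cons, ih]; simp

-- in a ≤-sorted list every element is at most the last
lemma pvLe_getLast {h : List Int} (hp : h.Pairwise (· ≤ ·)) (hne : h ≠ []) :
    ∀ a ∈ h, a ≤ h.getLast hne := by
  induction h with
  | nil => cases hne rfl
  | cons x t ih =>
    rcases List.pairwise_cons.mp hp with ⟨hx, ht⟩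
    intro a ha
    rcases List.mem_cons.mp ha with rfl | ha'
    · cases t with
      | nil => simp [List.getLast]
      | cons y u =>
        have := hx (List.getLast (y :: u) (by simp)) (List.getLast_mem (by simp))
        simpa [List.getLast_cons] using this
    · cases t with
      | nil => simp at ha'
      | cons y u =>
        have := ih ht (by simp) a ha'
        simpa [List.getLast_cons] using this

-- B's single scan over the sorted list computes (#distinct, #values-with-count≥2, prev2, prev)
lemma pvB_fold (ls : List Int) : ∀ (h : List Int), (h ++ ls).Pairwise (· ≤ ·) →
    ls.foldl
      (fun (st : Int × Int × Option Int × Option Int) v =>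
        if some v ≠ st.2.2.2 then (st.1 + 1, st.2.1, st.2.2.2, some v)
        else if some v ≠ st.2.2.1 then (st.1, st.2.1 + 1, st.2.2.2, some v)
        else (st.1, st.2.1, st.2.2.2, some v))
      ((h.toFinset.card : Int), ((h.toFinset.filter (fun w => 1 < h.count w)).card : Int),
        h.dropLast.getLast?, h.getLast?)
    = (((h ++ ls).toFinset.card : Int),
       (((h ++ ls).toFinset.filter (fun w => 1 < (h ++ ls).count w)).card : Int),
       (h ++ ls).dropLast.getLast?, (h ++ ls).getLast?) := by
  induction ls with
  | nil => intro h _; simp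
  | cons v ls' ih =>
    intro h hp
    have hassoc : (h ++ [v]) ++ ls' = h ++ v :: ls' := by simp
    have hp' : ((h ++ [v]) ++ ls').Pairwise (· ≤ ·) := by rwa [hassoc]
    have hle : ∀ a ∈ h, a ≤ v := by
      intro a ha
      exact (List.pairwise_append.mp hp).2.2 a ha v (by simp)
    have hph : h.Pairwise (· ≤ ·) := (List.pairwise_append.mp hp).1
    -- case analysis on the two trackers
    have hcw : ∀ w : Int, w ≠ v → (h ++ [v]).count w = h.count w := by
      intro w hwv
      have h0 : List.count w [v] = 0 := List.count_eq_zero.mpr (by simp [hwv])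
      simp [List.count_append, h0]
    have hcv : (h ++ [v]).count v = h.count v + 1 := by simp [List.count_append]
    have key :
        (if some v ≠ h.getLast? then
          ((h.toFinset.card : Int) + 1, ((h.toFinset.filter (fun w => 1 < h.count w)).card : Int),
            h.getLast?, some v)
        else if some v ≠ h.dropLast.getLast? then
          ((h.toFinset.card : Int), ((h.toFinset.filter (fun w => 1 < h.count w)).card : Int) + 1,
            h.getLast?, some v)
        else
          ((h.toFinset.card : Int), ((h.toFinset.filter (fun w => 1 < h.count w)).card : Int),
            h.getLast?, some v))
        = (((h ++ [v]).toFinset.card : Int),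
           (((h ++ [v]).toFinset.filter (fun w => 1 < (h ++ [v]).count w)).card : Int),
           (h ++ [v]).dropLast.getLast?, (h ++ [v]).getLast?) := by
      have hdl : (h ++ [v]).dropLast = h := by simp
      have hgl : (h ++ [v]).getLast? = some v := by simp
      by_cases h1 : some v = h.getLast?
      · -- v equals the last of h, so v ∈ h
        have hne : h ≠ [] := by rintro rfl; simp at h1
        have hlast : v = h.getLast hne := by
          have he := List.getLast?_eq_some_getLast (l := h) hne
          rw [he] at h1; exact Option.some_inj.mp h1
        have hvh : v ∈ h := hlast ▸ List.getLast_mem hne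
        have hins : (h ++ [v]).toFinset = h.toFinset := by
          ext w; simp; rintro rfl; exact hvh
        by_cases h2 : some v = h.dropLast.getLast?
        · -- run already has length ≥ 2 : count v h ≥ 2
          have hdne : h.dropLast ≠ [] := by rintro hd; rw [hd] at h2; simp at h2
          have hvdl : v ∈ h.dropLast := by
            have he := List.getLast?_eq_some_getLast (l := h.dropLast) hdne
            rw [he] at h2
            exact (Option.some_inj.mp h2) ▸ List.getLast_mem hdne
          have hcnt : 2 ≤ h.count v := by
            have hsplit : h.dropLast ++ [h.getLast hne] = h := List.dropLast_append_getLast hne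
            have hlv : h.getLast hne = v := hlast.symm
            calc 2 = 1 + 1 := rfl
              _ ≤ h.dropLast.count v + 1 := by
                    have : 1 ≤ h.dropLast.count v := List.one_le_count_iff.mpr hvdl
                    omega
              _ = (h.dropLast ++ [h.getLast hne]).count v := by
                    simp [List.count_append, hlv]
              _ = h.count v := by rw [hsplit]
          have hfil : (h ++ [v]).toFinset.filter (fun w => 1 < (h ++ [v]).count w)
              = h.toFinset.filter (fun w => 1 < h.count w) := by
            ext w
            simp only [Finset.mem_filter, hins]
            refine and_congr_right fun _ => ?_
            by_cases hwv : w = v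
            · subst hwv; rw [hcv]; omega
            · rw [hcw w hwv]
          rw [if_neg (not_not_intro h1), if_neg (not_not_intro h2), hdl, hgl, hfil, hins]
        · -- v is last of h but dropLast's last differs: count v h = 1
          have hsplit : h.dropLast ++ [h.getLast hne] = h := List.dropLast_append_getLast hne
          have hlv : h.getLast hne = v := hlast.symm
          have hnd : v ∉ h.dropLast := by
            intro hvd
            have hdne : h.dropLast ≠ [] := by rintro hd; rw [hd] at hvd; simp at hvd
            have hpd : h.dropLast.Pairwise (· ≤ ·) := hph.sublist (List.dropLast_sublist h)
            have h3 : v ≤ h.dropLast.getLast hdne := pvLe_getLast hpd hdne v hvd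
            have h4 : h.dropLast.getLast hdne ≤ v := by
              have hmem : h.dropLast.getLast hdne ∈ h :=
                (List.dropLast_sublist h).mem (List.getLast_mem hdne)
              have := pvLe_getLast hph hne _ hmem
              rwa [hlv] at this
            have : h.dropLast.getLast hdne = v := le_antisymm h4 h3
            exact h2 (by rw [List.getLast?_eq_some_getLast hdne, this])
          have hc1 : h.count v = 1 := by
            have : (h.dropLast ++ [h.getLast hne]).count v = 1 := by
              simp [List.count_append, hlv, List.count_eq_zero.mpr hnd]
            rwa [hsplit] at this
          have hfil : (h ++ [v]).toFinset.filter (fun w => 1 < (h ++ [v]).count w)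
              = insert v (h.toFinset.filter (fun w => 1 < h.count w)) := by
            ext w
            simp only [Finset.mem_filter, Finset.mem_insert, hins]
            by_cases hwv : w = v
            · subst hwv
              simp [hcv, hc1, hvh]
            · rw [hcw w hwv]
              simp [hwv]
          have hnotmem : v ∉ h.toFinset.filter (fun w => 1 < h.count w) := by
            simp [hc1]
          have hcard : (((h ++ [v]).toFinset.filter (fun w => 1 < (h ++ [v]).count w)).card : Int)
              = ((h.toFinset.filter (fun w => 1 < h.count w)).card : Int) + 1 := by
            rw [hfil, Finset.card_insert_of_notMem hnotmem]; push_cast; ring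
          rw [if_neg (not_not_intro h1), if_pos h2, hdl, hgl, hcard, hins]
      · -- v differs from the last of h: v ∉ h (h is sorted ≤ v)
        have hnv : v ∉ h := by
          intro hvh
          have hne : h ≠ [] := by rintro rfl; simp at hvh
          have h3 : v ≤ h.getLast hne := pvLe_getLast hph hne v hvh
          have h4 : h.getLast hne ≤ v := hle _ (List.getLast_mem hne)
          exact h1 (by rw [List.getLast?_eq_some_getLast hne, le_antisymm h3 h4])
        have hins : (h ++ [v]).toFinset = insert v h.toFinset := by
          ext w; simp
        have hcard : (((h ++ [v]).toFinset.card : Nat) : Int) = (h.toFinset.card : Int) + 1 := by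
          rw [hins, Finset.card_insert_of_notMem (by simpa using hnv)]; push_cast; ring
        have hfil : (h ++ [v]).toFinset.filter (fun w => 1 < (h ++ [v]).count w)
            = h.toFinset.filter (fun w => 1 < h.count w) := by
          ext w
          simp only [Finset.mem_filter, hins, Finset.mem_insert]
          by_cases hwv : w = v
          · subst hwv
            have h0 : h.count w = 0 := List.count_eq_zero.mpr hnv
            simp [hcv, h0, hnv]
          · rw [hcw w hwv]
            simp [hwv]
        rw [if_pos h1, hdl, hgl, hfil, hcard]
    rw [List.foldl_cons]
    have hrest := ih (h ++ [v]) hp'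
    rw [hassoc] at hrest
    rw [← hrest]
    exact congrFun (congrArg (List.foldl _) (by simpa using key)) ls'
-- distinct-element list length = toFinset card; same for its filtered version
lemma pvSet_card (m : List Int) : ((PySem.Set.ofList m).length : Int) = (m.toFinset.card : Int) := by
  have hnd : (PySem.Set.ofList m).Nodup := PySem.Set.nodup_ofList m
  have hfs : (PySem.Set.ofList m).toFinset = m.toFinset := by
    ext w; simp [List.mem_toFinset, PySem.Set.mem_ofList]
  rw [← hfs, List.toFinset_card_of_nodup hnd]

lemma pvSet_countP (m : List Int) :
    (((PySem.Set.ofList m).countP (fun w => decide (1 < m.count w)) : Nat) : Int)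
      = ((m.toFinset.filter (fun w => 1 < m.count w)).card : Int) := by
  have hnd : (PySem.Set.ofList m).Nodup := PySem.Set.nodup_ofList m
  have hndf : ((PySem.Set.ofList m).filter (fun w => decide (1 < m.count w))).Nodup :=
    hnd.filter _
  have hq : ((PySem.Set.ofList m).filter (fun w => decide (1 < m.count w))).toFinset
      = m.toFinset.filter (fun w => 1 < m.count w) := by
    ext w
    simp [PySem.Set.mem_ofList, Finset.mem_filter, List.mem_toFinset]
  rw [List.countP_eq_length_filter, ← List.toFinset_card_of_nodup hndf, hq]

-- ===== VERDICT (by name: the statement is the Claim_ definition above) =====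
theorem odd_one_out_spec : Claim_equal_odd_one_out := by
  intro lst _
  unfold Spec_odd_one_out odd_one_out odd_one_out_alt
  simp only [pvA_res, List.nil_append]
  set m : List Int := lst.map PySem.Str.len with hm
  set s : List Int := PySem.List.sorted m (fun x => x) false with hs
  have hperm : s.Perm m := PySem.List.sorted_perm m (fun x => x) false
  have hsorted : s.Pairwise (· ≤ ·) := by
    simpa using PySem.List.sorted_pairwise (xs := m) (key := fun x => x)
  have hfold := pvB_fold s [] (by simpa using hsorted)
  simp only [List.nil_append] at hfold
  have hinit : (((([] : List Int).toFinset.card : Nat) : Int),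
      (((([] : List Int).toFinset.filter (fun w => 1 < ([] : List Int).count w)).card : Nat) : Int),
      ([] : List Int).dropLast.getLast?, ([] : List Int).getLast?)
      = ((0 : Int), (0 : Int), (none : Option Int), (none : Option Int)) := by simp
  rw [hinit] at hfold
  rw [hfold]
  have hfs : s.toFinset = m.toFinset := by ext w; simp [hperm.mem_iff]
  have hcc : ∀ w, s.count w = m.count w := fun w => hperm.count_eq w
  have hfilter : s.toFinset.filter (fun w => 1 < s.count w)
      = m.toFinset.filter (fun w => 1 < m.count w) := by
    rw [hfs]; apply Finset.filter_congr; intro w _; simp [hcc w]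
  rw [PySem.List.foldl_ite_add_one, zero_add]
  rw [PySem.Set.len]
  by_cases hbig : 2 < ((PySem.Set.ofList m).length : Int)
  · have hb2 : ¬ ((s.toFinset.card : Int) ≤ 2) := by
      rw [hfs, ← pvSet_card m]; omega
    simp [hbig, hb2]
  · have hb2 : ((s.toFinset.card : Int) ≤ 2) := by
      rw [hfs, ← pvSet_card m]; omega
    have hcnt : ((((PySem.Set.ofList m).countP fun w => decide (1 < PySem.List.count m w)) : Nat) : Int)
        = ((s.toFinset.filter (fun w => 1 < s.count w)).card : Int) := by
      rw [hfilter, ← pvSet_countP m]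
      simp only [PySem.List.count_eq]
      rfl
    simp only [hbig, if_false, hb2, decide_true, Bool.true_and]
    rw [hcnt]
    rfl
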